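-- pv_equiv track=rewrite | github.com/s1366560/agi-demos | src/infrastructure/agent/planning/plan_generator.py | _map_dependencies
-- ===== SOURCE A (Python) =====
-- def _map_dependencies(
--
--     dep_indices: list[int],
--     step_indices: dict[str, int],
-- ) -> list[str]:
--     """
--     Map step index dependencies to step IDs.
--
--     Args:
--         dep_indices: List of step indices (0-based)
--         step_indices: Mapping of step_id to index
--
--     Returns:
--         List of step IDs that this step depends on
--     """
--     dependencies = []
--     index_to_id = {idx: sid for sid, idx in step_indices.items()}
--
--     for idx in dep_indices:
--         if idx in index_to_id:
--             dependencies.append(index_to_id[idx])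
--
--     return dependencies
-- ===== SOURCE B (Python) =====
-- def _map_dependencies(
--     dep_indices: list[int],
--     step_indices: dict[str, int],
-- ) -> list[str]:
--     positions = {}
--     for pos, idx in enumerate(dep_indices):
--         positions.setdefault(idx, []).append(pos)
--     slots = [None] * len(dep_indices)
--     for sid, i in step_indices.items():
--         for pos in positions.get(i, ()):
--             slots[pos] = sid
--     return [sid for sid in slots if sid is not None]
-- ===== Notes on version B (the rewrite author's own statement) =====
-- stated objective: alternative
-- what changed: B inverts the loop structure: it groups the positions of each index in dep_indices, then makes a single pass over step_indices filling a slot array at those positions, and returns the filled slots; A instead builds an inverted index->id dict and looks each dependency up.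
import Mathlib
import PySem

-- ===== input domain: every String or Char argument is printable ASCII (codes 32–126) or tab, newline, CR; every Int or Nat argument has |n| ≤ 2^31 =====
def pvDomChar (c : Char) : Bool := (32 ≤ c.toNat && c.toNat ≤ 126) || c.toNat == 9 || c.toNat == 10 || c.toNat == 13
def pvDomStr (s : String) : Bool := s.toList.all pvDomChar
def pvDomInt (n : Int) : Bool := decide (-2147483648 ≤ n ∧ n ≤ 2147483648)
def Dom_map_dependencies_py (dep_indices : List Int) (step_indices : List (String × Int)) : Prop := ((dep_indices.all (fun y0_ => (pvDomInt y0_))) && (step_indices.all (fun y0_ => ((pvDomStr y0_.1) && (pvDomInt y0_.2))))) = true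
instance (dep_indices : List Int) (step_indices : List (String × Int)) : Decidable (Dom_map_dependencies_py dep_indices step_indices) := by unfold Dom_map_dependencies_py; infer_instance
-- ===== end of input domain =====

-- B replaces A's inverted-index dict with grouping dependency positions and filling a slot array in one pass over step_indices; alternative decomposition, equal results.


-- ===== PORT A =====
def map_dependencies_py (dep_indices : List Int) (step_indices : List (String × Int)) : List String :=
  -- index_to_id = {idx: sid for sid, idx in step_indices.items()}
  let index_to_id : PySem.Dict Int String :=
    step_indices.foldl (fun d p => d.insert p.2 p.1) PySem.Dict.empty
  -- for idx in dep_indices: if idx in index_to_id: dependencies.append(index_to_id[idx])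
  dep_indices.foldl (fun dependencies idx =>
    match index_to_id.get? idx with
    | some sid => dependencies ++ [sid]
    | none => dependencies) []

-- ===== PORT B =====
def map_dependencies_py_alt (dep_indices : List Int) (step_indices : List (String × Int)) : List String :=
  -- positions = {}; for pos, idx in enumerate(dep_indices): positions.setdefault(idx, []).append(pos)
  let positions : PySem.Dict Int (List Int) :=
    (PySem.List.enumerate dep_indices 0).foldl
      (fun d q => d.modify q.2 [] (fun l => l ++ [q.1])) PySem.Dict.empty
  -- slots = [None] * len(dep_indices)
  let slots : List (Option String) := List.replicate dep_indices.length none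
  -- for sid, i in step_indices.items(): for pos in positions.get(i, ()): slots[pos] = sid
  let slots := step_indices.foldl
    (fun slots p => (positions.getD p.2 []).foldl
      (fun o q => PySem.List.pySetD o q (some p.1)) slots) slots
  -- return [sid for sid in slots if sid is not None]
  slots.filterMap id

-- ===== PRECONDITION & SPEC =====
def Spec_map_dependencies_py (dep_indices : List Int) (step_indices : List (String × Int)) (out : List String) : Prop := out = map_dependencies_py_alt dep_indices step_indices
instance (dep_indices : List Int) (step_indices : List (String × Int)) (out : List String) : Decidable (Spec_map_dependencies_py dep_indices step_indices out) := by unfold Spec_map_dependencies_py; infer_instance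

-- ===== CLAIM (what is proved, stated in full; the proofs are below) =====
def Claim_equal_map_dependencies_py : Prop := ∀ (dep_indices : List Int) (step_indices : List (String × Int)), Dom_map_dependencies_py dep_indices step_indices → Spec_map_dependencies_py dep_indices step_indices (map_dependencies_py dep_indices step_indices)

-- ===== LEMMAS AND PROOFS =====

-- the last step id with index idx after scanning L (A's inverted dict keeps exactly this)
def pvLastMatch (L : List (String × Int)) (idx : Int) : Option String :=
  L.foldl (fun matched p => if p.2 == idx then some p.1 else matched) none

-- the last-match scan with an arbitrary start value factors through the scan started at none
lemma lastMatch_shift (L : List (String × Int)) (idx : Int) (st : Option String) :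
    L.foldl (fun matched p => if p.2 == idx then some p.1 else matched) st
      = (pvLastMatch L idx).or st := by
  induction L generalizing st with
  | nil => simp [pvLastMatch]
  | cons p L ih =>
    simp only [pvLastMatch, List.foldl_cons] at *
    rw [ih, ih (if p.2 == idx then some p.1 else none)]
    cases h : L.foldl (fun matched p => if p.2 == idx then some p.1 else matched) none <;>
      split <;> simp

-- looking up idx in A's inverted dict is exactly the last matching step id
lemma get?_invert (L : List (String × Int)) (idx : Int) (d : PySem.Dict Int String) :
    (L.foldl (fun d p => d.insert p.2 p.1) d).get? idx
      = (pvLastMatch L idx).or (d.get? idx) := by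
  induction L generalizing d with
  | nil => simp [pvLastMatch]
  | cons p L ih =>
    simp only [List.foldl_cons]
    rw [ih, show pvLastMatch (p :: L) idx
        = (pvLastMatch L idx).or (if p.2 == idx then some p.1 else none) from by
      rw [pvLastMatch, List.foldl_cons, lastMatch_shift]]
    cases h : pvLastMatch L idx
    · simp only [pvLastMatch] at h
      simp only [h, Option.none_or]
      rw [PySem.Dict.get?_insert]
      by_cases he : idx = p.2
      · subst he; simp
      · have hb : (p.2 == idx) = false := by
          simp [beq_eq_false_iff_ne]; exact fun hh => he hh.symm
        simp [he, hb]
    · simp only [pvLastMatch] at h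
      simp [h]

-- A's loop is the filterMap of the last-match lookup
lemma foldl_match_eq_filterMap (dep : List Int) (f : Int → Option String) (acc : List String) :
    dep.foldl (fun a idx => match f idx with | some sid => a ++ [sid] | none => a) acc
      = acc ++ dep.filterMap f := by
  induction dep generalizing acc with
  | nil => simp
  | cons x dep ih =>
    simp only [List.foldl_cons, List.filterMap_cons]
    cases h : f x <;> simp [h, ih]

-- membership in the grouped position list: exactly the positions of idx in dep
lemma mem_posOf (dep : List Int) (idx : Int) (x : Int) :
    x ∈ ((PySem.List.enumerate dep 0).filter (fun q => q.2 == idx)).map (·.1)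
      ↔ ∃ (k : Nat) (_ : k < dep.length), x = (k : Int) ∧ dep[k] = idx := by
  simp only [List.mem_map, List.mem_filter, PySem.List.mem_enumerate_iff]
  constructor
  · rintro ⟨q, ⟨⟨k, hk, hq⟩, hfil⟩, hx⟩
    subst hq
    refine ⟨k, hk, ?_, ?_⟩
    · omega
    · simpa using hfil
  · rintro ⟨k, hk, rfl, hdep⟩
    exact ⟨((0 + k : Int), dep[k]), ⟨⟨k, hk, rfl⟩, by simpa using hdep⟩, by simp⟩

-- the grouping loop: positions.getD idx [] is the ordered list of positions of idx
lemma getD_positions (dep : List Int) (idx : Int) :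
    ((PySem.List.enumerate dep 0).foldl
        (fun d q => d.modify q.2 [] (fun l => l ++ [q.1])) PySem.Dict.empty).getD idx []
      = ((PySem.List.enumerate dep 0).filter (fun q => q.2 == idx)).map (·.1) := by
  have h := PySem.Dict.getD_foldl_modify_append
    (l := (PySem.List.enumerate dep 0).map (fun q => (q.2, q.1)))
    (d := (PySem.Dict.empty : PySem.Dict Int (List Int))) (c := idx)
  rw [List.foldl_map] at h
  simpa [List.filter_map, List.map_map, Function.comp] using h

-- every element of the position list is nonnegative and below dep.length
lemma posOf_bounds (dep : List Int) (idx : Int) (x : Int)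
    (hx : x ∈ ((PySem.List.enumerate dep 0).filter (fun q => q.2 == idx)).map (·.1)) :
    0 ≤ x ∧ x.toNat < dep.length := by
  rw [mem_posOf] at hx
  obtain ⟨k, hk, rfl, _⟩ := hx
  simp; omega

-- inner fill loop: a nonnegative position list sets exactly its members
lemma inner_set (P : List Int) (out : List (Option String)) (v : String) (j : Nat)
    (hj : j < out.length) (hpos : ∀ q ∈ P, 0 ≤ q) :
    (P.foldl (fun o q => PySem.List.pySetD o q (some v)) out)[j]?
      = if (j : Int) ∈ P then some (some v) else out[j]? := by
  induction P generalizing out with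
  | nil => simp
  | cons q P ih =>
    simp only [List.foldl_cons]
    have hq0 : 0 ≤ q := hpos q (by simp)
    rw [PySem.List.pySetD_of_nonneg out (some v) hq0]
    have hlen : (out.set q.toNat (some v)).length = out.length := by simp
    rw [ih (out.set q.toNat (some v)) (by omega) (fun r hr => hpos r (by simp [hr]))]
    by_cases hm : (j : Int) ∈ P
    · simp [hm]
    · by_cases he : q.toNat = j
      · subst he
        have hql : ((q.toNat : Int)) = q := by omega
        rw [if_neg hm, if_pos (by simp [hql])]
        simp [List.getElem?_set, hj]
      · have hji : (j : Int) ≠ q := by omega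
        rw [if_neg hm, if_neg (by simp [hji, hm])]
        simp [List.getElem?_set, he]

lemma inner_length (P : List Int) (out : List (Option String)) (v : String) :
    (P.foldl (fun o q => PySem.List.pySetD o q (some v)) out).length = out.length := by
  induction P generalizing out with
  | nil => rfl
  | cons q P ih => simp only [List.foldl_cons]; rw [ih]; simp

lemma fill_length (dep : List Int) (step : List (String × Int))
    (out : List (Option String)) :
    (step.foldl (fun slots p =>
        (((PySem.List.enumerate dep 0).filter (fun q => q.2 == p.2)).map (·.1)).foldl
          (fun o q => PySem.List.pySetD o q (some p.1)) slots) out).length = out.length := by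
  induction step generalizing out with
  | nil => rfl
  | cons p step ih => simp only [List.foldl_cons]; rw [ih, inner_length]

-- main fill characterization: slot j ends as the last matching step id (or keeps its start)
lemma fill_get (dep : List Int) (step : List (String × Int)) (out : List (Option String))
    (hlen : out.length = dep.length) (j : Nat) (hj : j < dep.length) :
    (step.foldl (fun slots p =>
        (((PySem.List.enumerate dep 0).filter (fun q => q.2 == p.2)).map (·.1)).foldl
          (fun o q => PySem.List.pySetD o q (some p.1)) slots) out)[j]?
      = ((pvLastMatch step dep[j]).map some).or out[j]? := by
  induction step generalizing out with
  | nil => simp [pvLastMatch]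
  | cons p step ih =>
    simp only [List.foldl_cons]
    have hlen' : ((((PySem.List.enumerate dep 0).filter (fun q => q.2 == p.2)).map (·.1)).foldl
        (fun o q => PySem.List.pySetD o q (some p.1)) out).length = dep.length := by
      rw [inner_length]; exact hlen
    rw [ih _ hlen']
    rw [inner_set _ _ _ _ (by omega) (fun q hq => (posOf_bounds dep p.2 q hq).1)]
    rw [show pvLastMatch (p :: step) dep[j]
        = (pvLastMatch step dep[j]).or (if p.2 == dep[j] then some p.1 else none) from by
      rw [pvLastMatch, List.foldl_cons, lastMatch_shift]]
    have hmem : ((j : Int) ∈ ((PySem.List.enumerate dep 0).filter (fun q => q.2 == p.2)).map (·.1))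
        ↔ dep[j] = p.2 := by
      rw [mem_posOf]
      constructor
      · rintro ⟨k, hk, hkj, hdep⟩
        have : k = j := by omega
        subst this; exact hdep
      · intro h; exact ⟨j, hj, rfl, h⟩
    cases hlm : pvLastMatch step dep[j] with
    | some s => simp
    | none =>
      simp only [Option.map_none, Option.none_or, Option.map_some]
      by_cases hd : dep[j] = p.2
      · have hb : (p.2 == dep[j]) = true := by simp [hd]
        simp [hmem.2 hd, hb]
      · have hb : (p.2 == dep[j]) = false := by
          simp [beq_eq_false_iff_ne]; exact fun hh => hd hh.symm
        have : ¬ ((j : Int) ∈ ((PySem.List.enumerate dep 0).filter (fun q => q.2 == p.2)).map (·.1)) := by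
          rw [hmem]; exact hd
        simp [this, hb]

-- ===== VERDICT (by name: the statement is the Claim_ definition above) =====
theorem map_dependencies_py_spec : Claim_equal_map_dependencies_py := by
  intro dep step _
  unfold Spec_map_dependencies_py
  simp only [map_dependencies_py, map_dependencies_py_alt]
  -- rewrite the grouped position lists
  have hposmap : ∀ i : Int,
      (((PySem.List.enumerate dep 0).foldl
          (fun d q => d.modify q.2 [] (fun l => l ++ [q.1])) PySem.Dict.empty).getD i [])
        = ((PySem.List.enumerate dep 0).filter (fun q => q.2 == i)).map (·.1) :=
    getD_positions dep
  -- B's final slots list is dep.map (pvLastMatch step)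
  have hslots :
      (step.foldl (fun slots p =>
          (((PySem.List.enumerate dep 0).foldl
              (fun d q => d.modify q.2 [] (fun l => l ++ [q.1])) PySem.Dict.empty).getD p.2 []).foldl
            (fun o q => PySem.List.pySetD o q (some p.1)) slots)
          (List.replicate dep.length none))
        = dep.map (fun idx => pvLastMatch step idx) := by
    have hfun : (fun (slots : List (Option String)) (p : String × Int) =>
        (((PySem.List.enumerate dep 0).foldl
            (fun d q => d.modify q.2 [] (fun l => l ++ [q.1])) PySem.Dict.empty).getD p.2 []).foldl
          (fun o q => PySem.List.pySetD o q (some p.1)) slots)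
        = (fun slots p =>
        (((PySem.List.enumerate dep 0).filter (fun q => q.2 == p.2)).map (·.1)).foldl
          (fun o q => PySem.List.pySetD o q (some p.1)) slots) := by
      funext slots p; rw [hposmap]
    rw [hfun]
    apply List.ext_getElem?
    intro j
    by_cases hj : j < dep.length
    · rw [fill_get dep step _ (by simp) j hj]
      simp [List.getElem?_replicate, hj, List.getElem?_map]
      cases pvLastMatch step dep[j] <;> simp
    · have h1 : (step.foldl (fun slots p =>
          (((PySem.List.enumerate dep 0).filter (fun q => q.2 == p.2)).map (·.1)).foldl
            (fun o q => PySem.List.pySetD o q (some p.1)) slots)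
          (List.replicate dep.length none)).length = dep.length := by
        rw [fill_length]; simp
      rw [List.getElem?_eq_none (by rw [h1]; exact Nat.le_of_not_lt hj),
        List.getElem?_eq_none (by simpa using Nat.le_of_not_lt hj)]
  rw [hslots]
  -- A's loop is the filterMap of the dict lookup = last match
  have hA : ∀ idx, ((step.foldl (fun d p => d.insert p.2 p.1) PySem.Dict.empty).get? idx)
      = pvLastMatch step idx := by
    intro idx
    rw [get?_invert]
    cases pvLastMatch step idx <;> simp [PySem.Dict.get?_empty]
  simp only [hA]
  rw [foldl_match_eq_filterMap]
  simp [List.filterMap_map]
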